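-- pv_equiv track=rewrite | github.com/paulmoise/python-exercises | exercise10.py | mot_lettre_repetee
-- ===== SOURCE A (Python) =====
-- def mot_lettre_repetee(list_words):
--     alphabet_letters = "abcdefghijklmnopqrstuvwxyz"
--     count_occurence_in_word = 0  #cette variable recupère le nombre d'occurence d'une lettre
--     max_occurence_inside_word = 0 #cette variable recupère la plus grande occurence dans un mot
--     words_with_max_occurrence = dict()
--     for word in list_words:
--         max_occurence_inside_word = 0 # réinitialiser l'occurrence maximale avant de passer au mot suivant de la llste
--         for letter in alphabet_letters:
--             count_occurence_in_word = word.count(letter) # on boucle sur les lettres de l'alphabet et on compte l'occurrence en utilisant la fonction count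
--             max_occurence_inside_word = max(max_occurence_inside_word, count_occurence_in_word) # recuperer le max du nombre d'occurence de la précédente et celui de la lettre suivante.
--         words_with_max_occurrence[max_occurence_inside_word]=word
--     maxOccurence = max(words_with_max_occurrence.keys())
--     return words_with_max_occurrence.get(maxOccurence)
-- ===== SOURCE B (Python) =====
-- def mot_lettre_repetee(list_words):
--     best, best_word = -1, None
--     for word in list_words:
--         freq = {}
--         for ch in word:
--             if 'a' <= ch <= 'z':
--                 freq[ch] = freq.get(ch, 0) + 1
--         score = max(freq.values(), default=0)
--         if score >= best:
--             best, best_word = score, word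
--     return best_word
-- ===== Notes on version B (the rewrite author's own statement) =====
-- stated objective: alternative
-- what changed: Scores each word by a single-pass character frequency table (max of the table's values) instead of 26 full w.count scans over the alphabet, and selects the winner with a running best accumulator (>= keeps the last maximal word) instead of a score-keyed dict plus a second max-over-keys pass and lookup.
import Mathlib
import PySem

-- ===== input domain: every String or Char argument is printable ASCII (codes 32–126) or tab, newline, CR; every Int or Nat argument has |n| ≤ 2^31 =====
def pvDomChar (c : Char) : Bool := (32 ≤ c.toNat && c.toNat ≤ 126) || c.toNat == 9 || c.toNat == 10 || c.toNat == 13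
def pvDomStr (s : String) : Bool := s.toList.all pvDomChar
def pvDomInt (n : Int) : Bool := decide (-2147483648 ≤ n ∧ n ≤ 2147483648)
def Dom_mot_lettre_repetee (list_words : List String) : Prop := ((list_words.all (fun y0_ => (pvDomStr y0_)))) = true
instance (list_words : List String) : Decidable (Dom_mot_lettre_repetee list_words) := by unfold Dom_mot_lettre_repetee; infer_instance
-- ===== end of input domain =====

-- B scores each word with a single-pass character-frequency table (max of its values) instead of
-- 26 full word.count scans, and selects the winner with a running-best accumulator (>= keeps the
-- last maximal word) instead of a score-keyed dict plus a second max-over-keys pass; alternative.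

-- ===== PORT A =====
-- the alphabet string A iterates over, as its list of characters
-- the characters of "abcdefghijklmnopqrstuvwxyz", written out
def pvAlphabet : List Char :=
  ['a','b','c','d','e','f','g','h','i','j','k','l','m',
   'n','o','p','q','r','s','t','u','v','w','x','y','z']

def mot_lettre_repetee (list_words : List String) : String :=
  let words_with_max_occurrence : PySem.Dict Int String :=
    list_words.foldl (fun d word =>
      -- inner loop: max_occurence_inside_word over the alphabet letters
      let m : Int := pvAlphabet.foldl
        (fun m letter => max m ((PySem.Str.count word (String.ofList [letter]) : Int))) 0
      d.insert m word) PySem.Dict.empty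
  -- max(keys): raises ValueError on the empty dict (empty input list) — excluded by Pre_
  let maxOccurence : Int := (PySem.List.max? words_with_max_occurrence.keys (fun x => x)).getD 0
  -- .get(maxOccurence): the key is always present here, so Python's Optional is a value
  (words_with_max_occurrence.get? maxOccurence).getD ""

-- ===== PORT B =====
-- 'a' <= ch <= 'z' on one-char Python strings is code-point order on the char
def pvIsLower (ch : Char) : Bool := 'a' ≤ ch && ch ≤ 'z'

def mot_lettre_repetee_alt (list_words : List String) : String :=
  -- best = -1, best_word = None; one forward pass
  let r := list_words.foldl (fun (st : Int × Option String) word =>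
      -- freq: single pass over the word's characters, counting only lowercase a-z
      let freq : PySem.Dict Char Int := word.toList.foldl
        (fun d ch => if pvIsLower ch then d.insert ch (d.getD ch 0 + 1) else d)
        PySem.Dict.empty
      -- score = max(freq.values(), default=0)
      let score : Int := (PySem.List.max? freq.values (fun x => x)).getD 0
      -- if score >= best: update (so the LAST word with the maximal score wins)
      if st.1 ≤ score then (score, some word) else st)
    ((-1 : Int), (none : Option String))
  -- on the empty list Python B returns None (outside Pre_; nothing claimed there)
  r.2.getD ""

-- ===== PRECONDITION & SPEC =====
-- Pre_ excludes exactly the empty list, where A raises ValueError (max() of an empty dict's keys).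
def Pre_mot_lettre_repetee (list_words : List String) : Prop := list_words ≠ []
instance (list_words : List String) : Decidable (Pre_mot_lettre_repetee list_words) := by
  unfold Pre_mot_lettre_repetee; infer_instance
def pvWitness_mot_lettre_repetee : List String := (["aa", "b"])

def Spec_mot_lettre_repetee (list_words : List String) (out : String) : Prop := out = mot_lettre_repetee_alt list_words
instance (list_words : List String) (out : String) : Decidable (Spec_mot_lettre_repetee list_words out) := by unfold Spec_mot_lettre_repetee; infer_instance

-- ===== CLAIM (what is proved, stated in full; the proofs are below) =====
def Claim_equal_mot_lettre_repetee : Prop := ∀ (list_words : List String), Dom_mot_lettre_repetee list_words → Pre_mot_lettre_repetee list_words → Spec_mot_lettre_repetee list_words (mot_lettre_repetee list_words)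

-- ===== LEMMAS AND PROOFS =====

-- the score A's inner alphabet loop computes
def pvScore (w : String) : Int :=
  pvAlphabet.foldl (fun m letter => max m ((PySem.Str.count w (String.ofList [letter]) : Int))) 0

-- str.count for a single-character needle is List.count
theorem pvCountGo (c : Char) : ∀ (fuel : Nat) (s : List Char) (acc : Nat), s.length ≤ fuel →
    PySem.Chars.count.go [c] fuel s acc = acc + s.count c := by
  intro fuel
  induction fuel with
  | zero =>
    intro s acc h
    have : s = [] := List.eq_nil_of_length_eq_zero (Nat.le_zero.mp h)
    subst this; rfl
  | succ n ih =>
    intro s acc h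
    cases s with
    | nil => rfl
    | cons x t =>
      show (if [c].isPrefixOf (x :: t) = true
            then PySem.Chars.count.go [c] n (List.drop [c].length (x :: t)) (acc + 1)
            else PySem.Chars.count.go [c] n t acc) = acc + (x :: t).count c
      have hlen : t.length ≤ n := by simpa using h
      have hpre : [c].isPrefixOf (x :: t) = (c == x) := by
        simp [List.isPrefixOf]
      rw [hpre]
      by_cases hcx : c = x
      · rw [if_pos (by simp [hcx])]
        simp only [List.length_cons, List.length_nil, List.drop_succ_cons, List.drop_zero]
        rw [ih t (acc + 1) hlen, List.count_cons]
        simp [hcx]; omega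
      · rw [if_neg (by simp [hcx])]
        rw [ih t acc hlen, List.count_cons]
        simp [Ne.symm hcx]

theorem pvCountChar (s : List Char) (c : Char) :
    PySem.Chars.count s [c] = s.count c := by
  show (if ([c] : List Char).isEmpty = true then s.length + 1
        else PySem.Chars.count.go [c] s.length s 0) = s.count c
  rw [if_neg (by simp)]
  rw [pvCountGo c s.length s 0 le_rfl]
  exact Nat.zero_add _

-- fold-of-max toolkit
theorem pvInit_le (f : Char → Int) (l : List Char) (a : Int) :
    a ≤ l.foldl (fun m c => max m (f c)) a := by
  induction l generalizing a with
  | nil => exact le_rfl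
  | cons x t ih => exact le_trans (le_max_left a (f x)) (ih (max a (f x)))

theorem pvMem_le (f : Char → Int) (l : List Char) : ∀ (a : Int) (c : Char), c ∈ l →
    f c ≤ l.foldl (fun m c => max m (f c)) a := by
  induction l with
  | nil => intro a c hc; cases hc
  | cons x t ih =>
    intro a c hc
    rw [List.mem_cons] at hc
    rcases hc with h | h
    · subst h; exact le_trans (le_max_right a (f c)) (pvInit_le f t _)
    · exact ih _ c h

theorem pvFold_le (f : Char → Int) (l : List Char) (b : Int) : ∀ (a : Int), a ≤ b →
    (∀ c ∈ l, f c ≤ b) → l.foldl (fun m c => max m (f c)) a ≤ b := by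
  induction l with
  | nil => intro a ha _; exact ha
  | cons x t ih =>
    intro a ha h
    exact ih _ (max_le ha (h x (List.mem_cons_self)))
      (fun c hc => h c (List.mem_cons_of_mem _ hc))

-- max(values, default=0) over nonnegative f on an index list is the running-max fold
theorem pvMaxD (f : Char → Int) (hf : ∀ k, 0 ≤ f k) (ks : List Char) :
    (PySem.List.max? (ks.map f) (fun x => x)).getD 0
      = ks.foldl (fun m c => max m (f c)) 0 := by
  cases ks with
  | nil => rfl
  | cons k t =>
    rw [List.map_cons, PySem.List.max?_id_cons, Option.getD_some, List.foldl_map]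
    rw [List.foldl_cons]
    congr 1
    exact (max_eq_right (hf k)).symm

-- every lowercase char is a letter of the alphabet string
set_option maxRecDepth 2048 in
theorem pvLower_mem (c : Char) (h : pvIsLower c = true) : c ∈ pvAlphabet := by
  have hb : 97 ≤ c.toNat ∧ c.toNat ≤ 122 := by
    simp only [pvIsLower, Bool.and_eq_true, decide_eq_true_eq, Char.le_def] at h
    exact ⟨h.1, h.2⟩
  obtain ⟨h1, h2⟩ := hb
  have hc : c = Char.ofNat c.toNat := (Char.ofNat_toNat c).symm
  interval_cases hn : c.toNat <;> rw [hc] <;> decide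

theorem pvAlpha_lower : ∀ c ∈ pvAlphabet, pvIsLower c = true := by
  intro c hc
  fin_cases hc <;> rfl

-- A's count of a letter in the word equals its count among the word's lowercase chars
theorem pvCount_bridge (w : String) (c : Char) (hc : pvIsLower c = true) :
    (PySem.Str.count w (String.ofList [c]) : Int)
      = ((w.toList.filter pvIsLower).count c : Int) := by
  have h1 : (String.ofList [c]).toList = [c] := by
    simp
  rw [PySem.Str.count_eq, h1, pvCountChar, List.count_filter hc]

theorem pvScore_nonneg (w : String) : 0 ≤ pvScore w := pvInit_le _ _ 0

-- B's per-word frequency-table score equals A's alphabet-scan score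
theorem pvScoreB_eq (w : String) :
    (PySem.List.max? (w.toList.foldl
        (fun d ch => if pvIsLower ch then d.insert ch (d.getD ch 0 + 1) else d)
        PySem.Dict.empty).values (fun x => x)).getD 0 = pvScore w := by
  set L : List Char := w.toList.filter pvIsLower with hL
  have hfreq : w.toList.foldl
      (fun d ch => if pvIsLower ch then d.insert ch (d.getD ch 0 + 1) else d)
      PySem.Dict.empty = PySem.Dict.counter L := by
    rw [hL, ← PySem.Dict.foldl_insert_getD_add_one_eq_counter, List.foldl_filter]
  rw [hfreq]
  rw [PySem.Dict.values_eq_map_keys _ (PySem.Dict.nodup_keys_counter L) 0]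
  have hmap : (PySem.Dict.counter L).keys.map (fun k => (PySem.Dict.counter L).getD k 0)
      = (PySem.Set.ofList L).map (fun k => (L.count k : Int)) := by
    rw [PySem.Dict.keys_counter]
    exact List.map_congr_left (fun k _ => PySem.Dict.getD_counter L k)
  rw [hmap, pvMaxD _ (fun k => Int.natCast_nonneg _)]
  -- antisymmetry between the two index lists
  unfold pvScore
  apply le_antisymm
  · apply pvFold_le _ _ _ _ (pvInit_le _ _ 0)
    intro k hk
    have hkL : k ∈ L := (PySem.Set.mem_ofList L k).mp hk
    have hklow : pvIsLower k = true := (List.mem_filter.mp hkL).2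
    rw [← pvCount_bridge w k hklow]
    exact pvMem_le _ _ _ k (pvLower_mem k hklow)
  · apply pvFold_le _ _ _ _ (pvInit_le _ _ 0)
    intro c hc
    have hclow := pvAlpha_lower c hc
    rw [pvCount_bridge w c hclow]
    by_cases hcl : c ∈ L
    · exact pvMem_le _ _ _ c ((PySem.Set.mem_ofList L c).mpr hcl)
    · have : L.count c = 0 := List.count_eq_zero.mpr hcl
      rw [this]
      exact le_trans (by norm_num) (pvInit_le _ _ 0)

-- one dict-insertion step of A
def pvIns (d : PySem.Dict Int String) (w : String) : PySem.Dict Int String :=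
  d.insert (pvScore w) w

-- running (best score, best word) pair, later word wins ties
def pvPStep (kv : Int × String) (w : String) : Int × String :=
  if kv.1 ≤ pvScore w then (pvScore w, w) else kv

-- B's loop on a (score, some word) state mirrors the plain pair fold
theorem pvBStep_some (t : List String) : ∀ (k : Int) (v : String),
    t.foldl (fun st w => if st.1 ≤ pvScore w then (pvScore w, some w) else st)
        (k, (some v : Option String))
      = ((t.foldl pvPStep (k, v)).1, some (t.foldl pvPStep (k, v)).2) := by
  induction t with
  | nil => intro k v; rfl
  | cons w t ih =>
    intro k v
    rw [List.foldl_cons, List.foldl_cons]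
    by_cases h : k ≤ pvScore w
    · rw [if_pos h]
      have : pvPStep (k, v) w = (pvScore w, w) := by simp [pvPStep, h]
      rw [this]; exact ih _ _
    · rw [if_neg h]
      have : pvPStep (k, v) w = (k, v) := by simp [pvPStep, h]
      rw [this]; exact ih _ _

theorem pv_max?_append_singleton (l : List Int) (a : Int) :
    PySem.List.max? (l ++ [a]) (fun x => x)
      = some ((PySem.List.max? l (fun x => x)).elim a (fun m => max m a)) := by
  rw [PySem.List.max?, List.foldl_append]
  rcases h : PySem.List.max? l (fun x => x) with _ | m
  · rw [PySem.List.max?] at h; rw [h]; rfl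
  · rw [PySem.List.max?] at h; rw [h]
    simp only [List.foldl_cons, List.foldl_nil, Option.elim]
    rw [Int.max_def]
    split_ifs <;> simp_all <;> omega

-- invariant of A's dict loop: max key and its word are the running pair fold
theorem pvAInv (l : List String) : ∀ (d : PySem.Dict Int String) (K : Int) (v : String),
    PySem.List.max? d.keys (fun x => x) = some K → d.get? K = some v →
    PySem.List.max? (l.foldl pvIns d).keys (fun x => x) = some (l.foldl pvPStep (K, v)).1 ∧
    (l.foldl pvIns d).get? (l.foldl pvPStep (K, v)).1 = some (l.foldl pvPStep (K, v)).2 := by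
  induction l with
  | nil => intro d K v hK hv; exact ⟨hK, hv⟩
  | cons w t ih =>
    intro d K v hK hv
    rw [List.foldl_cons, List.foldl_cons]
    have hkeys : PySem.List.max? (pvIns d w).keys (fun x => x) = some (max K (pvScore w)) := by
      unfold pvIns
      by_cases hc : d.contains (pvScore w) = true
      · rw [PySem.Dict.keys_insert_of_contains d w hc, hK]
        have hmem : pvScore w ∈ d.keys := (PySem.Dict.contains_iff_mem_keys d _).mp hc
        have := PySem.List.max?_isMax hK _ hmem
        simp only [max_eq_left this]
      · rw [PySem.Dict.keys_insert_of_not_contains d w (by simpa using hc),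
          pv_max?_append_singleton, hK]
        rfl
    by_cases hks : K ≤ pvScore w
    · have hstep : pvPStep (K, v) w = (pvScore w, w) := by simp [pvPStep, hks]
      have hmax : max K (pvScore w) = pvScore w := by omega
      rw [hstep]
      exact ih (pvIns d w) (pvScore w) w (by rw [hkeys, hmax])
        (by unfold pvIns; exact PySem.Dict.get?_insert_self d _ w)
    · have hstep : pvPStep (K, v) w = (K, v) := by simp [pvPStep, hks]
      have hmax : max K (pvScore w) = K := by omega
      rw [hstep]
      exact ih (pvIns d w) K v (by rw [hkeys, hmax])
        (by unfold pvIns; rw [PySem.Dict.get?_insert_of_ne d w (by omega)]; exact hv)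

-- ===== VERDICT (by name: the statement is the Claim_ definition above) =====
theorem mot_lettre_repetee_spec : Claim_equal_mot_lettre_repetee := by
  intro l _ hpre
  unfold Spec_mot_lettre_repetee
  cases l with
  | nil => exact absurd rfl hpre
  | cons x t =>
    -- B side first: rewrite its loop body into the pvScore form
    show (((x :: t).foldl pvIns PySem.Dict.empty).get?
        ((PySem.List.max? ((x :: t).foldl pvIns PySem.Dict.empty).keys (fun x => x)).getD 0)).getD ""
      = (((x :: t).foldl (fun (st : Int × Option String) word =>
            let freq : PySem.Dict Char Int := word.toList.foldl
              (fun d ch => if pvIsLower ch then d.insert ch (d.getD ch 0 + 1) else d)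
              PySem.Dict.empty
            let score : Int := (PySem.List.max? freq.values (fun x => x)).getD 0
            if st.1 ≤ score then (score, some word) else st)
          ((-1 : Int), (none : Option String))).2.getD "")
    have hfun : (fun (st : Int × Option String) word =>
        let freq : PySem.Dict Char Int := word.toList.foldl
          (fun d ch => if pvIsLower ch then d.insert ch (d.getD ch 0 + 1) else d)
          PySem.Dict.empty
        let score : Int := (PySem.List.max? freq.values (fun x => x)).getD 0
        if st.1 ≤ score then (score, some word) else st)
        = (fun (st : Int × Option String) w =>
            if st.1 ≤ pvScore w then (pvScore w, some w) else st) := by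
      funext st w
      show (if st.1 ≤ (PySem.List.max? (w.toList.foldl
              (fun d ch => if pvIsLower ch then d.insert ch (d.getD ch 0 + 1) else d)
              PySem.Dict.empty).values (fun x => x)).getD 0
            then ((PySem.List.max? (w.toList.foldl
              (fun d ch => if pvIsLower ch then d.insert ch (d.getD ch 0 + 1) else d)
              PySem.Dict.empty).values (fun x => x)).getD 0, some w) else st) = _
      rw [pvScoreB_eq]
    rw [hfun]
    rw [List.foldl_cons]  -- unfolds the A-side fold (leftmost occurrence)
    have hB : (List.foldl (fun (st : Int × Option String) w =>
          if st.1 ≤ pvScore w then (pvScore w, some w) else st)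
          ((-1 : Int), (none : Option String)) (x :: t)).2.getD ""
        = (t.foldl pvPStep (pvScore x, x)).2 := by
      rw [List.foldl_cons]
      have hfirst : (if ((-1 : Int), (none : Option String)).1 ≤ pvScore x
            then (pvScore x, some x)
            else ((-1 : Int), (none : Option String))) = (pvScore x, some x) := by
        rw [if_pos (le_trans (by norm_num) (pvScore_nonneg x))]
      rw [hfirst, pvBStep_some, Option.getD_some]
    rw [hB]
    -- A side: the dict invariant
    have hk1 : PySem.List.max? (pvIns PySem.Dict.empty x).keys (fun x => x) = some (pvScore x) := by
      unfold pvIns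
      rw [PySem.Dict.keys_insert_of_not_contains _ _ (by simp [PySem.Dict.contains_empty])]
      rw [PySem.Dict.keys_empty, List.nil_append]
      rfl
    have hg1 : (pvIns PySem.Dict.empty x).get? (pvScore x) = some x :=
      PySem.Dict.get?_insert_self _ _ _
    obtain ⟨hk, hg⟩ := pvAInv t (pvIns PySem.Dict.empty x) (pvScore x) x hk1 hg1
    rw [hk, Option.getD_some, hg, Option.getD_some]
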